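-- pv_equiv track=rewrite | github.com/eliottcassidy2000/math | 04-computation/beta2_local_to_global.py | all_tournaments
-- ===== SOURCE A (Python) =====
-- def all_tournaments(n):
--     pairs = [(i,j) for i in range(n) for j in range(i+1,n)]
--     m = len(pairs)
--     for mask in range(1 << m):
--         A = [[0]*n for _ in range(n)]
--         for idx, (i,j) in enumerate(pairs):
--             if (mask >> idx) & 1: A[i][j] = 1
--             else: A[j][i] = 1
--         yield A
-- ===== SOURCE B (Python) =====
-- def all_tournaments(n):
--     # Backtracking generator: recursively choose each edge's orientation (choice
--     # list aligned with pairs), building the matrix only at the leaves.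
--     pairs = [(i, j) for i in range(n) for j in range(i + 1, n)]
--
--     def rec(k, tail):
--         if k == 0:
--             A = [[0] * n for _ in range(n)]
--             for (i, j), b in zip(pairs, tail):
--                 if b:
--                     A[i][j] = 1
--                 else:
--                     A[j][i] = 1
--             yield A
--         else:
--             yield from rec(k - 1, [0] + tail)
--             yield from rec(k - 1, [1] + tail)
--
--     yield from rec(len(pairs), [])
-- ===== Notes on version B (the rewrite author's own statement) =====
-- stated objective: alternative
-- what changed: Replaces A's enumeration of all bitmasks with an inner bit-extraction loop by a backtracking recursion over the edge list that orients one edge per level (0-branch first, first pair varying fastest) and builds each matrix at the leaves from the accumulated choice list.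
import Mathlib
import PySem

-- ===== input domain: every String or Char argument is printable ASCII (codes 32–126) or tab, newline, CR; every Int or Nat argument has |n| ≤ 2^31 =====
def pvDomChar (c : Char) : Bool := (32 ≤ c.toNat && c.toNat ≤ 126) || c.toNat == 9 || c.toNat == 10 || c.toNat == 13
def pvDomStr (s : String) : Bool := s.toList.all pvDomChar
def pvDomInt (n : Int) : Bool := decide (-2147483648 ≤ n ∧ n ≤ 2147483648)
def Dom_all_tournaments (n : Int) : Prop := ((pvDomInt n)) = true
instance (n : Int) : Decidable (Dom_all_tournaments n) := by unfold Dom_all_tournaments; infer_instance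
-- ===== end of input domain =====

-- B replaces A's bitmask enumeration by a backtracking recursion over the edge list
-- (same output list, same order); objective: alternative decomposition, not speed.

-- ===== PORT A =====
-- A[i][j] = 1 for in-range non-negative i, j (always the case here: i, j come from
-- range(n) so 0 ≤ i, j < number of rows), so List.set with .toNat is exact.
def pvSetCell (A : List (List Int)) (i j : Int) (v : Int) : List (List Int) :=
  A.set i.toNat ((A.getD i.toNat []).set j.toNat v)

-- literal port of A: pairs comprehension, then for mask in range(1 << m) build a
-- matrix by testing bit idx of mask for each enumerated pair.  masks are the
-- non-negative ints 0 .. 2^m-1, represented as Nat ((mask >> idx) & 1 is exact).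
def all_tournaments (n : Int) : List (List (List Int)) :=
  let pairs : List (Int × Int) :=
    (PySem.List.pyRange 0 n 1).flatMap
      (fun i => (PySem.List.pyRange (i + 1) n 1).map (fun j => (i, j)))
  let m := pairs.length
  (List.range (1 <<< m)).map (fun mask =>
    let A0 := List.replicate n.toNat (List.replicate n.toNat (0 : Int))
    (PySem.List.enumerate pairs).foldl
      (fun A p =>
        if (mask >>> p.1.toNat) &&& 1 == 1 then pvSetCell A p.2.1 p.2.2 1
        else pvSetCell A p.2.2 p.2.1 1) A0)

-- ===== PORT B =====
-- leaf of Source B's rec: build the matrix from the accumulated orientation choices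
def pvLeaf (n : Int) (pairs : List (Int × Int)) (tail : List Int) : List (List Int) :=
  (pairs.zip tail).foldl
    (fun A pb =>
      if pb.2 ≠ 0 then pvSetCell A pb.1.1 pb.1.2 1
      else pvSetCell A pb.1.2 pb.1.1 1)
    (List.replicate n.toNat (List.replicate n.toNat (0 : Int)))

-- Source B's rec: orient pairs[k-1] both ways (0 first), recurse, emit at the leaf
def pvRec (n : Int) (pairs : List (Int × Int)) (k : Nat) (tail : List Int) :
    List (List (List Int)) :=
  match k with
  | 0 => [pvLeaf n pairs tail]
  | k + 1 => pvRec n pairs k (0 :: tail) ++ pvRec n pairs k (1 :: tail)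

def all_tournaments_alt (n : Int) : List (List (List Int)) :=
  let pairs : List (Int × Int) :=
    (PySem.List.pyRange 0 n 1).flatMap
      (fun i => (PySem.List.pyRange (i + 1) n 1).map (fun j => (i, j)))
  pvRec n pairs pairs.length []

-- ===== PRECONDITION & SPEC =====
def Spec_all_tournaments (n : Int) (out : List (List (List Int))) : Prop := out = all_tournaments_alt n
instance (n : Int) (out : List (List (List Int))) : Decidable (Spec_all_tournaments n out) := by unfold Spec_all_tournaments; infer_instance

-- ===== CLAIM (what is proved, stated in full; the proofs are below) =====
def Claim_equal_all_tournaments : Prop := ∀ (n : Int), Dom_all_tournaments n → Spec_all_tournaments n (all_tournaments n)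

-- ===== LEMMAS AND PROOFS =====

-- little-endian bit list of mask, k bits, as 0/1 ints
def pvBits (mask k : Nat) : List Int :=
  (List.range k).map (fun i => if mask.testBit i then (1 : Int) else 0)

theorem pvBits_succ_lt {mask k : Nat} (h : mask < 2 ^ k) :
    pvBits mask (k + 1) = pvBits mask k ++ [0] := by
  simp [pvBits, List.range_succ, Nat.testBit_lt_two_pow h]

theorem pvBits_succ_add {mask k : Nat} (h : mask < 2 ^ k) :
    pvBits (2 ^ k + mask) (k + 1) = pvBits mask k ++ [1] := by
  simp only [pvBits, List.range_succ, List.map_append, List.map_singleton]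
  congr 1
  · apply List.map_congr_left
    intro i hi
    rw [Nat.testBit_two_pow_add_gt (List.mem_range.mp hi)]
  · rw [Nat.testBit_two_pow_add_eq, Nat.testBit_lt_two_pow h]
    simp

-- A's enumerate/bit-test fold equals B's zip fold with the bit list (general start)
theorem pvFold_enum (mask : Nat) (ps : List (Int × Int)) (s : Nat) (A : List (List Int)) :
    (PySem.List.enumerate ps (s : Int)).foldl
      (fun A p =>
        if (mask >>> p.1.toNat) &&& 1 == 1 then pvSetCell A p.2.1 p.2.2 1
        else pvSetCell A p.2.2 p.2.1 1) A
    = (ps.zip ((List.range' s ps.length).map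
          (fun i => if mask.testBit i then (1 : Int) else 0))).foldl
        (fun A pb =>
          if pb.2 ≠ 0 then pvSetCell A pb.1.1 pb.1.2 1
          else pvSetCell A pb.1.2 pb.1.1 1) A := by
  induction ps generalizing s A with
  | nil => simp [PySem.List.enumerate_nil]
  | cons p ps ih =>
    rw [PySem.List.enumerate_cons]
    simp only [List.length_cons, List.range'_succ, List.map_cons, List.zip_cons_cons,
      List.foldl_cons]
    have hb : ((mask >>> ((s : Int)).toNat) &&& 1 == 1) = mask.testBit s := by
      simp [Nat.testBit, Int.toNat_natCast, Nat.and_one_is_mod]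
    have hs1 : ((s : Int) + 1) = ((s + 1 : Nat) : Int) := by push_cast; ring
    rw [hb, hs1, ih (s + 1)]
    by_cases hbit : mask.testBit s <;> simp [hbit]

-- B's recursion enumerates all bit lists of length k (bit for pairs[0] fastest)
theorem pvRec_eq (n : Int) (pairs : List (Int × Int)) (k : Nat) (tail : List Int) :
    pvRec n pairs k tail
      = (List.range (2 ^ k)).map (fun mask => pvLeaf n pairs (pvBits mask k ++ tail)) := by
  induction k generalizing tail with
  | zero => simp [pvRec, pvBits]
  | succ k ih =>
    rw [pvRec, ih, ih]
    have hsplit : List.range (2 ^ (k + 1)) =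
        List.range (2 ^ k) ++ (List.range (2 ^ k)).map (fun m => 2 ^ k + m) := by
      have h2 : 2 ^ (k + 1) = 2 ^ k + 2 ^ k := by ring
      rw [h2, List.range_add]
    rw [hsplit, List.map_append, List.map_map]
    congr 1
    · apply List.map_congr_left
      intro mask hm
      rw [pvBits_succ_lt (List.mem_range.mp hm)]
      simp
    · apply List.map_congr_left
      intro mask hm
      simp only [Function.comp]
      rw [pvBits_succ_add (List.mem_range.mp hm)]
      simp

-- ===== VERDICT (by name: the statement is the Claim_ definition above) =====
theorem all_tournaments_spec : Claim_equal_all_tournaments := by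
  intro n _
  unfold Spec_all_tournaments all_tournaments all_tournaments_alt
  simp only [Nat.shiftLeft_eq, Nat.one_mul]
  rw [pvRec_eq]
  apply List.map_congr_left
  intro mask _
  have h0 : (PySem.List.enumerate
      ((PySem.List.pyRange 0 n 1).flatMap
        (fun i => (PySem.List.pyRange (i + 1) n 1).map (fun j => (i, j)))))
      = PySem.List.enumerate
      ((PySem.List.pyRange 0 n 1).flatMap
        (fun i => (PySem.List.pyRange (i + 1) n 1).map (fun j => (i, j)))) ((0 : Nat) : Int) := by
    norm_num
  rw [h0, pvFold_enum]
  simp [pvLeaf, pvBits, List.range_eq_range']
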